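-- pv_equiv track=rewrite | github.com/kellymhli/code-challenges | minimum-subseq-in-non-increasing-order.py | minSubseq
-- ===== SOURCE A (Python) =====
-- def minSubseq(nums) -> list:
--     nums.sort()
--     l, r, res = sum(nums), 0, []
--     for i in range(1, len(nums)+1):
--         if l >= r:
--             l -= nums[-i]
--             r += nums[-i]
--             res += [nums[-i]]
--         else:
--             break
--     return res
-- ===== SOURCE B (Python) =====
-- def minSubseq(nums) -> list:
--     # Return-value equivalent to A; like A it sorts the caller's list in place (ascending).
--     nums.sort()
--     desc = nums[::-1]
--     total = sum(desc)
--     cums = [0]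
--     run = 0
--     for x in desc:
--         run += x
--         cums.append(run)
--     k = len(desc)
--     for j, c in enumerate(cums):
--         if 2 * c > total:
--             k = j
--             break
--     return desc[:k]
-- ===== Notes on version B (the rewrite author's own statement) =====
-- stated objective: alternative
-- what changed: B replaces A's greedy loop that maintains two running sums (rest/taken) with a break by a prefix-sum list over the descending-sorted array, a first-index search for 2*cum > total, and a slice of the k largest elements.
import Mathlib
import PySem

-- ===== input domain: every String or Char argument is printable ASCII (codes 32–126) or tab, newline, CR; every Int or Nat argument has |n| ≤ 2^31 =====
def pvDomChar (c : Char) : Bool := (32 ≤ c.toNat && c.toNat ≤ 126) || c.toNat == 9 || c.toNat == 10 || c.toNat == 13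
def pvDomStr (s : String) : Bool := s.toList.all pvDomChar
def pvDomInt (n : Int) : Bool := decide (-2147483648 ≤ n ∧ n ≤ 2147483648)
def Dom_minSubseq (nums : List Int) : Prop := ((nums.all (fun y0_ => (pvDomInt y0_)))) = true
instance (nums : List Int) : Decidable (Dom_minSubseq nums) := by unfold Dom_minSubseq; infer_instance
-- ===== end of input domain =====

-- B reworks A's two-running-sums greedy loop into prefix sums + a first-index search + a slice
-- (objective: alternative; equivalence is about the RETURN value — both Pythons sort the caller's list in place).

-- ===== PORT A =====
-- A's for-loop over range(1, len(nums)+1) with early break, state (l, r, res).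
def minSubseqLoopA (s : List Int) : List Int → Int → Int → List Int → List Int
  | [], _, _, res => res
  | i :: rest, l, r, res =>
    if l ≥ r then
      -- nums[-i]; 1 ≤ i ≤ len(s), so the index is always in range (getD never fires)
      let x := (PySem.List.pyGet? s (-i)).getD 0
      minSubseqLoopA s rest (l - x) (r + x) (res ++ [x])
    else res

def minSubseq (nums : List Int) : List Int :=
  let s := PySem.List.sorted nums (fun x => x) false
  minSubseqLoopA s (PySem.List.pyRange 1 ((s.length : Int) + 1) 1) s.sum 0 []

-- ===== PORT B =====
-- 'for j, c in enumerate(cums): if 2*c > total: k = j; break' with initial k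
def minSubseqFindB (total : Int) : List (Int × Int) → Int → Int
  | [], k => k
  | (j, c) :: rest, k => if 2 * c > total then j else minSubseqFindB total rest k

def minSubseq_alt (nums : List Int) : List Int :=
  let s := PySem.List.sorted nums (fun x => x) false
  let desc := (PySem.List.slice? s none none (-1)).getD []   -- nums[::-1]; step -1 ≠ 0, always some
  let total := desc.sum
  let cums := (desc.foldl (fun (p : List Int × Int) x => (p.1 ++ [p.2 + x], p.2 + x)) ([0], 0)).1
  let k := minSubseqFindB total (PySem.List.enumerate cums 0) (desc.length : Int)
  PySem.List.slice desc none (some k)   -- desc[:k]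

-- ===== PRECONDITION & SPEC =====
def Spec_minSubseq (nums : List Int) (out : List Int) : Prop := out = minSubseq_alt nums
instance (nums : List Int) (out : List Int) : Decidable (Spec_minSubseq nums out) := by unfold Spec_minSubseq; infer_instance

-- ===== CLAIM (what is proved, stated in full; the proofs are below) =====
def Claim_equal_minSubseq : Prop := ∀ (nums : List Int), Dom_minSubseq nums → Spec_minSubseq nums (minSubseq nums)

-- ===== LEMMAS AND PROOFS =====

-- Common reference function: greedily take elements while 2*(taken so far) ≤ total.
def fGreedy (total : Int) : List Int → Int → List Int
  | [], _ => []
  | x :: t, c => if 2 * c ≤ total then x :: fGreedy total t (c + x) else []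

-- prefix sums of t starting from accumulated value c
def cumsFrom : Int → List Int → List Int
  | _, [] => []
  | c, x :: t => (c + x) :: cumsFrom (c + x) t

lemma cums_fold_eq (t : List Int) : ∀ (acc : List Int) (run : Int),
    t.foldl (fun (p : List Int × Int) x => (p.1 ++ [p.2 + x], p.2 + x)) (acc, run)
      = (acc ++ cumsFrom run t, run + t.sum) := by
  induction t with
  | nil => intro acc run; simp [cumsFrom]
  | cons x t ih =>
      intro acc run
      simp only [List.foldl_cons, ih, cumsFrom, List.sum_cons, Prod.mk.injEq]
      exact ⟨by simp, by ring⟩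

lemma findB_eq (total : Int) (t : List Int) : ∀ (c j dflt : Int),
    (∃ m : Nat, minSubseqFindB total (PySem.List.enumerate (c :: cumsFrom c t) j) dflt = j + (m : Int)
        ∧ t.take m = fGreedy total t c)
    ∨ (minSubseqFindB total (PySem.List.enumerate (c :: cumsFrom c t) j) dflt = dflt
        ∧ fGreedy total t c = t) := by
  induction t with
  | nil =>
      intro c j dflt
      by_cases h : 2 * c > total
      · left; exact ⟨0, by simp [cumsFrom, PySem.List.enumerate_cons, PySem.List.enumerate_nil,
          minSubseqFindB, h, fGreedy]⟩
      · right; simp [cumsFrom, PySem.List.enumerate_cons, PySem.List.enumerate_nil,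
          minSubseqFindB, h, fGreedy]
  | cons x t ih =>
      intro c j dflt
      by_cases h : 2 * c > total
      · left
        refine ⟨0, ?_, ?_⟩
        · rw [PySem.List.enumerate_cons]
          show (if 2 * c > total then j else _) = j + ((0 : Nat) : Int)
          rw [if_pos h]; simp
        · simp [fGreedy, show ¬ (2 * c ≤ total) by omega]
      · have hle : 2 * c ≤ total := by omega
        have hstep : minSubseqFindB total (PySem.List.enumerate (c :: cumsFrom c (x :: t)) j) dflt
            = minSubseqFindB total (PySem.List.enumerate ((c + x) :: cumsFrom (c + x) t) (j + 1)) dflt := by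
          rw [show cumsFrom c (x :: t) = (c + x) :: cumsFrom (c + x) t from rfl,
            PySem.List.enumerate_cons]
          show (if 2 * c > total then j else _) = _
          rw [if_neg h]
        rcases ih (c + x) (j + 1) dflt with ⟨m, hm, htk⟩ | ⟨hd, hall⟩
        · left
          refine ⟨m + 1, ?_, ?_⟩
          · rw [hstep, hm]; push_cast; ring
          · simp [List.take_succ_cons, htk, fGreedy, hle]
        · right
          exact ⟨by rw [hstep, hd], by simp [fGreedy, hle, hall]⟩

lemma loopA_eq (s : List Int) (total : Int) : ∀ (k : Nat), k ≤ s.length → ∀ (c : Int) (res : List Int),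
    minSubseqLoopA s (PySem.List.pyRange ((s.length : Int) + 1 - (k : Int)) ((s.length : Int) + 1) 1)
        (total - c) c res
      = res ++ fGreedy total (s.reverse.drop (s.length - k)) c := by
  intro k
  induction k with
  | zero =>
      intro _ c res
      rw [PySem.List.pyRange_one_eq_nil (by omega)]
      simp [minSubseqLoopA, fGreedy, List.drop_eq_nil_of_le]
  | succ k ih =>
      intro hk c res
      have hklt : k < s.length := by omega
      rw [PySem.List.pyRange_one_cons (by push_cast; omega)]
      have hidx : PySem.List.pyGet? s (-(((s.length : Int) + 1 - ((k : Int) + 1))))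
          = some s[k] := by
        have h1 : ((s.length : Int) + 1 - ((k : Int) + 1)) = ((s.length - k : Nat) : Int) := by
          push_cast [Nat.cast_sub (le_of_lt hklt)]; ring
        rw [h1, PySem.List.pyGet?_neg_natCast s (s.length - k) (by omega) (by omega)]
        have h2 : s.length - (s.length - k) = k := by omega
        rw [h2, List.getElem?_eq_getElem hklt]
      have hdrop : s.reverse.drop (s.length - (k + 1)) = s[k] :: s.reverse.drop (s.length - k) := by
        have h3 : s.length - (k + 1) < s.reverse.length := by simp; omega
        have h4 := List.getElem_cons_drop (as := s.reverse) (i := s.length - (k+1)) h3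
        have h5 : s.length - (k + 1) + 1 = s.length - k := by omega
        rw [h5] at h4
        rw [← h4, List.getElem_reverse]
        congr 2
        omega
      simp only [Nat.cast_succ] at *
      unfold minSubseqLoopA
      simp only [hidx, Option.getD_some]
      by_cases h : total - c ≥ c
      · rw [if_pos h]
        have h6 : ((s.length : Int) + 1 - ((k : Int) + 1)) + 1 = (s.length : Int) + 1 - (k : Int) := by ring
        have h7 : total - c - s[k] = total - (c + s[k]) := by ring
        rw [h6, h7, ih (by omega) (c + s[k]) (res ++ [s[k]])]
        rw [hdrop]
        simp [fGreedy, show 2 * c ≤ total by omega]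
      · rw [if_neg h]
        rw [hdrop]
        simp [fGreedy, show ¬ (2 * c ≤ total) by omega]

-- ===== VERDICT (by name: the statement is the Claim_ definition above) =====
theorem minSubseq_spec : Claim_equal_minSubseq := by
  intro nums _
  unfold Spec_minSubseq minSubseq minSubseq_alt
  simp only [PySem.List.slice?_none_none_neg_one, Option.getD_some]
  set s := PySem.List.sorted nums (fun x => x) false with hs
  have hA : minSubseqLoopA s (PySem.List.pyRange 1 ((s.length : Int) + 1) 1) s.sum 0 []
      = fGreedy s.sum s.reverse 0 := by
    have := loopA_eq s s.sum s.length (le_refl _) 0 []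
    simpa [add_sub_cancel_left] using this
  rw [hA, cums_fold_eq s.reverse [0] 0]
  simp only [List.singleton_append, List.sum_reverse, List.length_reverse]
  rcases findB_eq s.sum s.reverse 0 0 (s.length : Int) with ⟨m, hm, htk⟩ | ⟨hd, hall⟩
  · rw [hm, PySem.List.slice_to _ (by omega)]
    simp [← htk]
  · rw [hd, PySem.List.slice_to _ (by omega)]
    simp [hall]
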